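-- pv_equiv track=rewrite | github.com/kazuhiko1979/edabit_2 | 143_very_hard_Sort_a_String_with_the_Given_Template.py | custom_sort
-- ===== SOURCE A (Python) =====
-- def custom_sort(t, s):
--
--     order = "".join([i for i in s if i in t])
--     origin = "".join([i for i in s if i not in t])
--
--     priority = {char: i for i, char in enumerate(t)}
--
--     def get_sort_key(x):
--         return priority.get(x, -1)
--
--     sorted_s = ''.join(sorted(order, key=get_sort_key))
--     return sorted_s + ''.join(sorted(origin))
-- ===== SOURCE B (Python) =====
-- def custom_sort(t, s):
--     # counting sort: one pass over t for last positions, one pass over s for counts,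
--     # then emit each template char at its last t-position, then the rest by char value
--     last = {}
--     for i, c in enumerate(t):
--         last[c] = i
--     cnt = {}
--     for c in s:
--         cnt[c] = cnt.get(c, 0) + 1
--     parts = []
--     for i, c in enumerate(t):
--         if last[c] == i and c in cnt:
--             parts.append(c * cnt[c])
--     for c in sorted(k for k in cnt if k not in last):
--         parts.append(c * cnt[c])
--     return ''.join(parts)
-- ===== Notes on version B (the rewrite author's own statement) =====
-- stated objective: faster
-- what changed: Replaces A's per-character substring membership filters plus comparison sort by key with a counting sort: one pass over t records each char's last position, one pass over s counts characters, then the output is emitted group-by-group while scanning t (each template char at its last position) followed by the distinct non-template chars sorted once.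
import Mathlib
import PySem

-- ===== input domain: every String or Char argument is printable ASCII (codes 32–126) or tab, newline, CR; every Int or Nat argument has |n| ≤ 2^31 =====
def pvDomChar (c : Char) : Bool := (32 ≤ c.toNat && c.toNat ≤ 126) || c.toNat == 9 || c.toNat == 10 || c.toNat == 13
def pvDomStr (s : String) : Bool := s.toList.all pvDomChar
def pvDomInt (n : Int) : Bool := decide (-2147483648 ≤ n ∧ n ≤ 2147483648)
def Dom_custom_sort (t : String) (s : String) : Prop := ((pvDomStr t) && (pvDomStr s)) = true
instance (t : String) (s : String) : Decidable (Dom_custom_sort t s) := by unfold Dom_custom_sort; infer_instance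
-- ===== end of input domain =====

-- B replaces A's per-char membership filters + comparison sort by template key with a counting
-- sort (last template positions + char counts, emit groups while scanning t); same return value.

-- ===== PORT A =====
-- transliteration of A; strings handled as their char lists ('i in t' = Chars.isIn [i] t,
-- str + / ''.join = list append, one String.ofList at the end — exact for str results)
def custom_sort (t : String) (s : String) : String :=
  let T := t.toList
  let order := s.toList.filter (fun i => PySem.Chars.isIn [i] T)
  let origin := s.toList.filter (fun i => !PySem.Chars.isIn [i] T)
  let priority : PySem.Dict Char Int :=
    (PySem.List.enumerate T).foldl (fun d p => d.insert p.2 p.1) PySem.Dict.empty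
  -- get_sort_key(x) = priority.get(x, -1)
  let sorted_s := PySem.List.sorted order (fun x => priority.getD x (-1))
  String.ofList (sorted_s ++ PySem.List.sorted origin (fun x => x))

-- ===== PORT B =====
-- transliteration of Source B; last[c] is looked up with getD (-1) (c is always a key there);
-- 'c * cnt[c]' is pyRepeat, ''.join(parts) is Chars.join []
def custom_sort_alt (t : String) (s : String) : String :=
  let T := t.toList
  let last : PySem.Dict Char Int :=
    (PySem.List.enumerate T).foldl (fun d p => d.insert p.2 p.1) PySem.Dict.empty
  let cnt : PySem.Dict Char Int :=
    s.toList.foldl (fun d c => d.insert c (d.getD c 0 + 1)) PySem.Dict.empty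
  let parts1 : List (List Char) := (PySem.List.enumerate T).foldl
      (fun acc p => if last.getD p.2 (-1) == p.1 && cnt.contains p.2
                    then acc ++ [PySem.List.pyRepeat [p.2] (cnt.getD p.2 0)] else acc) []
  let rest := PySem.List.sorted (cnt.keys.filter (fun k => !last.contains k)) (fun x => x)
  let parts := rest.foldl (fun acc c => acc ++ [PySem.List.pyRepeat [c] (cnt.getD c 0)]) parts1
  String.ofList (PySem.Chars.join [] parts)

-- ===== PRECONDITION & SPEC =====
def Spec_custom_sort (t : String) (s : String) (out : String) : Prop := out = custom_sort_alt t s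
instance (t : String) (s : String) (out : String) : Decidable (Spec_custom_sort t s out) := by unfold Spec_custom_sort; infer_instance

-- ===== CLAIM (what is proved, stated in full; the proofs are below) =====
def Claim_equal_custom_sort : Prop := ∀ (t : String) (s : String), Dom_custom_sort t s → Spec_custom_sort t s (custom_sort t s)

-- ===== LEMMAS AND PROOFS =====

-- the priority/last dict both Pythons build: char ↦ its last index in T
def csLast (T : List Char) : PySem.Dict Char Int :=
  (PySem.List.enumerate T).foldl (fun d p => d.insert p.2 p.1) PySem.Dict.empty

theorem isIn_singleton (c : Char) (T : List Char) :
    PySem.Chars.isIn [c] T = decide (c ∈ T) := by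
  rcases h : PySem.Chars.isIn [c] T with _|_
  · rw [PySem.Chars.isIn_eq_false_iff, List.singleton_infix_iff] at h
    simp [h]
  · rw [PySem.Chars.isIn_iff_infix, List.singleton_infix_iff] at h
    simp [h]

theorem csLast_app (T : List Char) (a : Char) :
    csLast (T ++ [a]) = (csLast T).insert a (T.length : Int) := by
  unfold csLast
  rw [PySem.List.enumerate_append, List.foldl_append]
  simp [PySem.List.enumerate_cons, PySem.List.enumerate_nil]

theorem csLast_spec (T : List Char) :
    (∀ x, (csLast T).contains x = decide (x ∈ T)) ∧
    (∀ x ∈ T, ∃ n : Nat, (csLast T).get? x = some (n : Int) ∧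
      ((n : Int), x) ∈ PySem.List.enumerate T 0) := by
  induction T using List.reverseRecOn with
  | nil =>
    refine ⟨fun x => by simp [csLast, PySem.List.enumerate_nil, PySem.Dict.contains_empty],
            fun x hx => by simp at hx⟩
  | append_singleton T a ih =>
    refine ⟨fun x => ?_, fun x hx => ?_⟩
    · rw [csLast_app, PySem.Dict.contains_insert, ih.1 x]
      by_cases hx : x = a <;> simp [hx]
    · rw [csLast_app]
      by_cases hxa : x = a
      · subst hxa
        refine ⟨T.length, ?_, ?_⟩
        · rw [PySem.Dict.get?_insert]; simp
        · rw [PySem.List.enumerate_append]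
          simp [PySem.List.enumerate_cons]
      · have hxT : x ∈ T := by
          rcases List.mem_append.mp hx with h | h
          · exact h
          · simp at h; exact absurd h hxa
        obtain ⟨n, hg, hm⟩ := ih.2 x hxT
        refine ⟨n, ?_, ?_⟩
        · rw [PySem.Dict.get?_insert]; simp [hxa, hg]
        · rw [PySem.List.enumerate_append]; exact List.mem_append_left _ hm

theorem csLast_contains (T : List Char) (x : Char) :
    (csLast T).contains x = decide (x ∈ T) := (csLast_spec T).1 x

theorem csLast_getD (T : List Char) (x : Char) (hx : x ∈ T) :
    ∃ n : Nat, (csLast T).getD x (-1) = (n : Int) ∧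
      ((n : Int), x) ∈ PySem.List.enumerate T 0 := by
  obtain ⟨n, hg, hm⟩ := (csLast_spec T).2 x hx
  exact ⟨n, by rw [PySem.Dict.getD_eq_get?_getD, hg]; rfl, hm⟩

theorem mem_enum_elt {T : List Char} {n : Nat} {x : Char}
    (h : ((n : Int), x) ∈ PySem.List.enumerate T 0) : n < T.length ∧ T[n]? = some x := by
  rw [PySem.List.mem_enumerate_iff] at h
  obtain ⟨k, hk, he⟩ := h
  have h1 : (n : Int) = 0 + (k : Int) := congrArg Prod.fst he
  have h2 : x = T[k] := congrArg Prod.snd he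
  have hnk : n = k := by omega
  subst hnk
  exact ⟨hk, by simp [h2]⟩

theorem csLast_injOn (T : List Char) {a b : Char} (ha : a ∈ T) (hb : b ∈ T)
    (h : (csLast T).getD a (-1) = (csLast T).getD b (-1)) : a = b := by
  obtain ⟨na, hga, hma⟩ := csLast_getD T a ha
  obtain ⟨nb, hgb, hmb⟩ := csLast_getD T b hb
  rw [hga, hgb] at h
  have : na = nb := by exact_mod_cast h
  subst this
  have h1 := (mem_enum_elt hma).2
  have h2 := (mem_enum_elt hmb).2
  rw [h1] at h2
  exact (Option.some_inj.mp h2)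

theorem count_flatMap_rep (x : Char) (E : List (Int × Char)) (m : Char → Nat) :
    (E.flatMap (fun p => List.replicate (m p.2) p.2)).count x
      = E.countP (fun p => p.2 == x) * m x := by
  induction E with
  | nil => simp
  | cons p E ih =>
    rw [List.flatMap_cons, List.count_append, ih, List.countP_cons]
    by_cases h : p.2 = x
    · simp [h, Nat.add_mul]; omega
    · simp [List.count_replicate, h]

theorem count_flatMap_rep' (x : Char) (R : List Char) (m : Char → Nat) :
    (R.flatMap (fun c => List.replicate (m c) c)).count x = R.count x * m x := by
  induction R with
  | nil => simp
  | cons c R ih =>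
    rw [List.flatMap_cons, List.count_append, ih, List.count_cons]
    by_cases h : c = x
    · simp [h, Nat.add_mul]; omega
    · simp [List.count_replicate, h]

theorem join_nil_flatten (ll : List (List Char)) :
    PySem.Chars.join [] ll = ll.flatten := by
  induction ll with
  | nil => rfl
  | cons a l ih =>
    cases l with
    | nil => simp [PySem.Chars.join, List.intercalate, List.intersperse]
    | cons b r => rw [PySem.Chars.join_cons_cons, ih, List.flatten_cons]; simp

-- the first half: A's key-sort of the kept chars IS B's grouped scan over the template
theorem part1_eq (T S : List Char) :
    PySem.List.sorted (S.filter (fun c => decide (c ∈ T))) (fun x => (csLast T).getD x (-1))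
      = ((PySem.List.enumerate T).filter
          (fun p => (csLast T).getD p.2 (-1) == p.1 && (PySem.Dict.counter S).contains p.2)).flatMap
          (fun p => List.replicate (((PySem.Dict.counter S).getD p.2 0)).toNat p.2) := by
  set kf := fun x => (csLast T).getD x (-1) with hkf
  set E := (PySem.List.enumerate T).filter
      (fun p => (csLast T).getD p.2 (-1) == p.1 && (PySem.Dict.counter S).contains p.2) with hE
  have hmemE : ∀ p ∈ E, p ∈ PySem.List.enumerate T 0 ∧ kf p.2 = p.1 ∧ p.2 ∈ S := by
    intro p hp
    rw [hE, List.mem_filter] at hp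
    obtain ⟨hmem, hcond⟩ := hp
    rw [Bool.and_eq_true, beq_iff_eq] at hcond
    refine ⟨hmem, hcond.1, ?_⟩
    have := hcond.2
    rw [PySem.Dict.contains_counter] at this
    exact List.mem_of_elem_eq_true this
  have hsnd_mem : ∀ p ∈ PySem.List.enumerate T 0, p.2 ∈ T := by
    intro p hp
    rw [PySem.List.mem_enumerate_iff] at hp
    obtain ⟨k, hk, rfl⟩ := hp
    exact List.getElem_mem hk
  have hpair1 : (PySem.List.sorted (S.filter (fun c => decide (c ∈ T))) kf).Pairwise
      (fun a b => kf a < kf b ∨ a = b) := by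
    refine (PySem.List.sorted_pairwise _ kf).imp_of_mem ?_
    intro a b ha hb hle
    rw [PySem.List.mem_sorted, List.mem_filter] at ha hb
    have haT : a ∈ T := by simpa using ha.2
    have hbT : b ∈ T := by simpa using hb.2
    rcases lt_or_eq_of_le hle with h | h
    · exact Or.inl h
    · exact Or.inr (csLast_injOn T haT hbT h)
  have hpair2 : ((E.flatMap (fun p => List.replicate (((PySem.Dict.counter S).getD p.2 0)).toNat p.2))).Pairwise
      (fun a b => kf a < kf b ∨ a = b) := by
    rw [List.flatMap_def, List.pairwise_flatten]
    refine ⟨?_, ?_⟩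
    · intro l hl
      simp only [List.mem_map] at hl
      obtain ⟨p, _, rfl⟩ := hl
      exact List.pairwise_replicate.mpr (Or.inr (Or.inr rfl))
    · rw [List.pairwise_map]
      have hEpair : E.Pairwise (fun p q => p.1 < q.1) :=
        (PySem.List.pairwise_lt_enumerate T 0).filter _
      refine hEpair.imp_of_mem ?_
      intro p q hp hq hlt x hx y hy
      rw [List.eq_of_mem_replicate hx, List.eq_of_mem_replicate hy]
      left
      rw [(hmemE p hp).2.1, (hmemE q hq).2.1]
      exact hlt
  have hperm : (PySem.List.sorted (S.filter (fun c => decide (c ∈ T))) kf).Perm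
      (E.flatMap (fun p => List.replicate (((PySem.Dict.counter S).getD p.2 0)).toNat p.2)) := by
    rw [List.perm_iff_count]
    intro x
    rw [count_flatMap_rep x E (fun c => ((PySem.Dict.counter S).getD c 0).toNat)]
    have hcnt : (((PySem.Dict.counter S).getD x 0)).toNat = S.count x := by
      rw [PySem.Dict.getD_counter]; exact Int.toNat_natCast _
    rw [hcnt, (PySem.List.sorted_perm _ kf false).count_eq x]
    by_cases hxT : x ∈ T
    · have h1 : (S.filter (fun c => decide (c ∈ T))).count x = S.count x :=
        List.count_filter (by simp [hxT])
      rw [h1]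
      by_cases hxS : x ∈ S
      · obtain ⟨n, hgd, hm⟩ := csLast_getD T x hxT
        have hcountP : E.countP (fun p => p.2 == x) = 1 := by
          rw [hE, List.countP_filter]
          have hcongr : (PySem.List.enumerate T 0).countP
              (fun p => p.2 == x && ((csLast T).getD p.2 (-1) == p.1 && (PySem.Dict.counter S).contains p.2))
              = (PySem.List.enumerate T 0).countP (fun p => p == ((n : Int), x)) := by
            apply List.countP_congr
            intro p hp
            constructor
            · intro hc
              rw [Bool.and_eq_true, Bool.and_eq_true, beq_iff_eq, beq_iff_eq] at hc
              have h2 : p.2 = x := hc.1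
              have h1' : p.1 = (n : Int) := by rw [← hc.2.1, h2, hgd]
              rw [beq_iff_eq]
              exact Prod.ext h1' h2
            · intro hc
              rw [beq_iff_eq] at hc
              subst hc
              rw [Bool.and_eq_true, Bool.and_eq_true, beq_iff_eq, beq_iff_eq]
              exact ⟨rfl, hgd, by rw [PySem.Dict.contains_counter]; exact List.elem_eq_true_of_mem hxS⟩
          rw [hcongr]
          have hnd : (PySem.List.enumerate T 0).Nodup :=
            (PySem.List.pairwise_lt_enumerate T 0).imp (by intro a b hlt he; rw [he] at hlt; exact lt_irrefl _ hlt)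
          rw [← List.count_eq_countP]
          exact List.count_eq_one_of_mem hnd hm
        rw [hcountP, one_mul]
      · have h0 : S.count x = 0 := by rw [List.count_eq_zero]; exact hxS
        rw [h0, Nat.mul_zero]
    · have h0 : (S.filter (fun c => decide (c ∈ T))).count x = 0 := by
        rw [List.count_eq_zero]
        intro hmem
        rw [List.mem_filter] at hmem
        simp [hxT] at hmem
      have h0' : E.countP (fun p => p.2 == x) = 0 := by
        rw [List.countP_eq_zero]
        intro p hp
        have : p.2 ∈ T := hsnd_mem p ((hmemE p hp).1)
        simp only [beq_iff_eq]
        intro he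
        rw [he] at this
        exact hxT this
      rw [h0, h0', Nat.zero_mul]
  exact @List.Perm.eq_of_pairwise' _ (fun a b => kf a < kf b ∨ a = b)
    ⟨by
      intro a b h1 h2
      rcases h1 with h | h
      · rcases h2 with h' | h'
        · exact absurd h (lt_asymm h')
        · exact h'.symm
      · exact h⟩
    _ _ hpair1 hpair2 hperm

-- the second half: A's plain sort of the dropped chars IS B's run over the sorted distinct chars
theorem part2_eq (T S : List Char) :
    PySem.List.sorted (S.filter (fun c => !decide (c ∈ T))) (fun x => x)
      = (PySem.List.sorted ((PySem.Dict.counter S).keys.filter (fun k => !(csLast T).contains k))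
          (fun x => x)).flatMap
          (fun c => List.replicate (((PySem.Dict.counter S).getD c 0)).toNat c) := by
  have hKnodup : (((PySem.Dict.counter S).keys.filter (fun k => !(csLast T).contains k))).Nodup := by
    rw [PySem.Dict.keys_counter]
    exact (PySem.Set.nodup_ofList S).filter _
  set K := (PySem.Dict.counter S).keys.filter (fun k => !(csLast T).contains k) with hK
  set R := PySem.List.sorted K (fun x => x) with hR
  have hRperm : R.Perm K := PySem.List.sorted_perm K _ false
  have hRnodup : R.Nodup := (hRperm.symm).nodup hKnodup
  have hmemR : ∀ x, x ∈ R ↔ (x ∈ S ∧ x ∉ T) := by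
    intro x
    rw [hR, PySem.List.mem_sorted, hK, List.mem_filter, PySem.Dict.keys_counter,
        PySem.Set.mem_ofList, csLast_contains]
    simp
  have hpair2 : ((R.flatMap (fun c => List.replicate (((PySem.Dict.counter S).getD c 0)).toNat c))).Pairwise (· ≤ ·) := by
    rw [List.flatMap_def, List.pairwise_flatten]
    refine ⟨?_, ?_⟩
    · intro l hl
      simp only [List.mem_map] at hl
      obtain ⟨c, _, rfl⟩ := hl
      exact List.pairwise_replicate.mpr (Or.inr le_rfl)
    · rw [List.pairwise_map]
      have := PySem.List.sorted_pairwise K (fun x => x)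
      rw [← hR] at this
      refine this.imp ?_
      intro a b hab x hx y hy
      rw [List.eq_of_mem_replicate hx, List.eq_of_mem_replicate hy]
      exact hab
  have hpair1 : (PySem.List.sorted (S.filter (fun c => !decide (c ∈ T))) (fun x => x)).Pairwise (· ≤ ·) :=
    PySem.List.sorted_pairwise _ _
  have hperm : (PySem.List.sorted (S.filter (fun c => !decide (c ∈ T))) (fun x => x)).Perm
      (R.flatMap (fun c => List.replicate (((PySem.Dict.counter S).getD c 0)).toNat c)) := by
    rw [List.perm_iff_count]
    intro x
    rw [count_flatMap_rep' x R (fun c => ((PySem.Dict.counter S).getD c 0).toNat)]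
    have hcnt : (((PySem.Dict.counter S).getD x 0)).toNat = S.count x := by
      rw [PySem.Dict.getD_counter]; exact Int.toNat_natCast _
    rw [hcnt]
    have hcs : (PySem.List.sorted (S.filter (fun c => !decide (c ∈ T))) (fun x => x)).count x
        = (S.filter (fun c => !decide (c ∈ T))).count x :=
      (PySem.List.sorted_perm _ _ false).count_eq x
    rw [hcs]
    by_cases hxT : x ∈ T
    · have h0 : (S.filter (fun c => !decide (c ∈ T))).count x = 0 := by
        rw [List.count_eq_zero]
        intro hmem
        rw [List.mem_filter] at hmem
        simp [hxT] at hmem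
      have h0' : R.count x = 0 := by
        rw [List.count_eq_zero]
        intro hmem
        exact ((hmemR x).mp hmem).2 hxT
      rw [h0, h0', Nat.zero_mul]
    · have h1 : (S.filter (fun c => !decide (c ∈ T))).count x = S.count x :=
        List.count_filter (by simp [hxT])
      rw [h1]
      by_cases hxS : x ∈ S
      · have : R.count x = 1 := List.count_eq_one_of_mem hRnodup ((hmemR x).mpr ⟨hxS, hxT⟩)
        rw [this, one_mul]
      · have h2 : R.count x = 0 := by
          rw [List.count_eq_zero]
          intro hmem
          exact hxS ((hmemR x).mp hmem).1
        have h3 : S.count x = 0 := by rw [List.count_eq_zero]; exact hxS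
        rw [h2, h3]
  exact List.Perm.eq_of_pairwise' hpair1 hpair2 hperm

-- ===== VERDICT (by name: the statement is the Claim_ definition above) =====
theorem custom_sort_spec : Claim_equal_custom_sort := by
  intro t s _
  show custom_sort t s = custom_sort_alt t s
  simp only [custom_sort, custom_sort_alt]
  rw [PySem.Dict.foldl_insert_getD_add_one_eq_counter]
  have hcs : (PySem.List.enumerate t.toList).foldl (fun d p => d.insert p.2 p.1) PySem.Dict.empty
      = csLast t.toList := rfl
  rw [hcs]
  rw [PySem.List.foldl_append_if, PySem.List.foldl_append_singleton_eq_map, List.nil_append]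
  rw [join_nil_flatten, List.flatten_append, ← List.flatMap_def, ← List.flatMap_def]
  simp only [PySem.List.pyRepeat_singleton, isIn_singleton]
  rw [part1_eq t.toList s.toList, part2_eq t.toList s.toList]
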